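-- pv_equiv track=rewrite | github.com/D3V-S4NJ4Y/Agentic-System | src/tools/pattern_matcher.py | _handle_universal_statement
-- ===== SOURCE A (Python) =====
-- def _handle_universal_statement(problem: str) -> bool:
--     """Handle universal statements (all, every, each)"""
--     # Extract the subject and predicate
--     words = problem.split()
--     try:
--         universal_idx = next(i for i, word in enumerate(words)
--                            if word in ["all", "every", "each"])
--         subject = words[universal_idx + 1]
--         return True  # Simplified - assume statement is true
--     except:
--         return False
-- ===== SOURCE B (Python) =====
-- def _handle_universal_statement(problem: str) -> bool:
--     """Handle universal statements (all, every, each)"""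
--     words = problem.split()
--     # a quantifier counts only if a subject word follows it
--     return any(w in ("all", "every", "each") for w in words[:-1])
-- ===== Notes on version B (the rewrite author's own statement) =====
-- stated objective: simpler
-- what changed: Replaced A's find-first-index over enumerate plus indexing guarded by try/except with a single any-membership scan over all words but the last (a quantifier only counts when a subject word follows it).
import Mathlib
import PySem

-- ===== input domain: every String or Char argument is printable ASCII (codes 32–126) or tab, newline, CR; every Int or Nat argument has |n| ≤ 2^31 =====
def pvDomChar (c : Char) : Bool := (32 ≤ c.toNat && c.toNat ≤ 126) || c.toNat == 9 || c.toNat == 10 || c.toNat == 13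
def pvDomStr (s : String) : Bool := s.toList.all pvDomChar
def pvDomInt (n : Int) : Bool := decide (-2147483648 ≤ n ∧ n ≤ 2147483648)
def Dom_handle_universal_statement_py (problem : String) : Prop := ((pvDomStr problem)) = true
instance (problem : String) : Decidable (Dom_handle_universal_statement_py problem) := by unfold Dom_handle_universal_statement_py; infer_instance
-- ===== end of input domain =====

-- B replaces A's find-first-index + indexing + try/except by a single membership
-- scan over all words but the last (a quantifier needs a following subject word); objective: simpler.

-- ===== PORT A =====
def handle_universal_statement_py (problem : String) : Bool :=
  let words := PySem.Str.split₀ problem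
  -- next(i for i, word in enumerate(words) if word in ["all","every","each"]) ; StopIteration → except → False
  match (PySem.List.enumerate words 0).find?
      (fun p => p.2 == "all" || p.2 == "every" || p.2 == "each") with
  | none => false
  | some (universal_idx, _) =>
    -- subject = words[universal_idx + 1] ; IndexError → except → False
    match PySem.List.pyGet? words (universal_idx + 1) with
    | none => false
    | some _subject => true

-- ===== PORT B =====
def handle_universal_statement_py_alt (problem : String) : Bool :=
  let words := PySem.Str.split₀ problem
  (PySem.List.slice words none (some (-1))).any
    (fun w => w == "all" || w == "every" || w == "each")

-- ===== PRECONDITION & SPEC =====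
def Spec_handle_universal_statement_py (problem : String) (out : Bool) : Prop := out = handle_universal_statement_py_alt problem
instance (problem : String) (out : Bool) : Decidable (Spec_handle_universal_statement_py problem out) := by unfold Spec_handle_universal_statement_py; infer_instance

-- ===== CLAIM (what is proved, stated in full; the proofs are below) =====
def Claim_equal_handle_universal_statement_py : Prop := ∀ (problem : String), Dom_handle_universal_statement_py problem → Spec_handle_universal_statement_py problem (handle_universal_statement_py problem)

-- ===== LEMMAS AND PROOFS =====

def pvPred (w : String) : Bool := w == "all" || w == "every" || w == "each"

lemma find_enum_fst (ws : List String) : ∀ (s : Nat),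
    ((PySem.List.enumerate ws (s : Int)).find? (fun p => pvPred p.2)).map Prod.fst
      = (ws.findIdx? pvPred).map (fun k => ((s + k : Nat) : Int)) := by
  induction ws with
  | nil => intro s; simp [PySem.List.enumerate_nil]
  | cons w ws ih =>
    intro s
    rw [PySem.List.enumerate_cons, List.find?_cons, List.findIdx?_cons]
    by_cases h : pvPred w
    · simp [h]
    · have : ((s : Int) + 1) = ((s + 1 : Nat) : Int) := by push_cast; ring
      rw [this]
      simp only [h, ih (s + 1), Bool.false_eq_true, if_false, Option.map_map]
      cases ws.findIdx? pvPred
      · simp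
      · simp; ring

lemma core_eq (ws : List String) :
    (match (PySem.List.enumerate ws 0).find? (fun p => pvPred p.2) with
      | none => false
      | some (i, _) =>
        match PySem.List.pyGet? ws (i + 1) with
        | none => false
        | some _ => true)
      = ws.dropLast.any pvPred := by
  have hfst := find_enum_fst ws 0
  simp only [Nat.cast_zero, Nat.zero_add] at hfst
  cases hidx : ws.findIdx? pvPred with
  | none =>
    rw [hidx] at hfst
    cases hfind : (PySem.List.enumerate ws 0).find? (fun p => pvPred p.2) with
    | none =>
      have hall := List.findIdx?_eq_none_iff.mp hidx
      symm
      simp only [List.any_eq_false]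
      exact fun x hx => by simp [hall x (List.mem_of_mem_dropLast hx)]
    | some p => rw [hfind] at hfst; simp at hfst
  | some k =>
    rw [hidx] at hfst
    obtain ⟨hklt, hpk, hmin⟩ := List.findIdx?_eq_some_iff_getElem.mp hidx
    cases hfind : (PySem.List.enumerate ws 0).find? (fun p => pvPred p.2) with
    | none => rw [hfind] at hfst; simp at hfst
    | some p =>
      rw [hfind] at hfst
      obtain ⟨i, v⟩ := p
      simp only [Option.map_some, Option.some.injEq] at hfst
      subst hfst
      have hcast : ((k : Int) + 1) = ((k + 1 : Nat) : Int) := by push_cast; ring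
      simp only [hcast, PySem.List.pyGet?_natCast]
      by_cases hlt : k + 1 < ws.length
      · rw [List.getElem?_eq_getElem hlt]
        have hk' : k < ws.dropLast.length := by simp [List.length_dropLast]; omega
        have : ws.dropLast.any pvPred = true := by
          refine List.any_eq_true.mpr ⟨ws.dropLast[k], List.getElem_mem hk', ?_⟩
          rw [List.getElem_dropLast]; exact hpk
        simp [this]
      · rw [List.getElem?_eq_none (by omega)]
        have : ws.dropLast.any pvPred = false := by
          simp only [List.any_eq_false]
          intro x hx
          obtain ⟨j, hj, rfl⟩ := List.mem_iff_getElem.mp hx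
          rw [List.getElem_dropLast]
          exact hmin j (by simp [List.length_dropLast] at hj; omega)
        simp [this]

-- ===== VERDICT (by name: the statement is the Claim_ definition above) =====
theorem handle_universal_statement_py_spec : Claim_equal_handle_universal_statement_py := by
  intro problem _
  unfold Spec_handle_universal_statement_py
  simp only [handle_universal_statement_py, handle_universal_statement_py_alt,
    PySem.List.slice_to_neg_one]
  exact core_eq (PySem.Str.split₀ problem)
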